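-- pv_equiv track=rewrite | github.com/familycourt/AlgorithmStudy | kakao/james/james_p118666.py | solution
-- ===== SOURCE A (Python) =====
-- def solution(survey, choices):
--     choices = [x - 4 for x in choices]
--     result = {
--         ('R', 'T'): 0,
--         ('C', 'F'): 0,
--         ('J', 'M'): 0,
--         ('A', 'N'): 0,
--     }
--     for s, c in zip(survey, choices):
--         for k in result.keys():
--             if s[0] in k:
--                 rev = 1 if s[1] > s[0] else -1
--                 result[k] += c * rev
--     answer = ''.join([k[0] if v <= 0 else k[1] for k, v in result.items()])
--     return answer
-- ===== SOURCE B (Python) =====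
-- def solution(survey, choices):
--     # Loop interchange: one independent sum per indicator pair, no dict at all.
--     answer = ''
--     for p in ('RT', 'CF', 'JM', 'AN'):
--         t = sum((c - 4) if s[1] > s[0] else (4 - c)
--                 for s, c in zip(survey, choices) if s[0] in p)
--         answer += p[0] if t <= 0 else p[1]
--     return answer
-- ===== Notes on version B (the rewrite author's own statement) =====
-- stated objective: simpler
-- what changed: A makes one pass over the survey keeping a dict keyed by the four letter-pairs and rescanning all four keys per entry with a sign flip; B interchanges the loops: it keeps no dict and computes, for each of the four pairs in turn, an independent generator-sum of signed scores over the zipped survey, appending the chosen letter directly.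
-- outside the precondition, e.g. on solution([''], [5]): A raises IndexError, B raises IndexError; on solution(['R'], [5]): A raises IndexError, B raises IndexError
import Mathlib
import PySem

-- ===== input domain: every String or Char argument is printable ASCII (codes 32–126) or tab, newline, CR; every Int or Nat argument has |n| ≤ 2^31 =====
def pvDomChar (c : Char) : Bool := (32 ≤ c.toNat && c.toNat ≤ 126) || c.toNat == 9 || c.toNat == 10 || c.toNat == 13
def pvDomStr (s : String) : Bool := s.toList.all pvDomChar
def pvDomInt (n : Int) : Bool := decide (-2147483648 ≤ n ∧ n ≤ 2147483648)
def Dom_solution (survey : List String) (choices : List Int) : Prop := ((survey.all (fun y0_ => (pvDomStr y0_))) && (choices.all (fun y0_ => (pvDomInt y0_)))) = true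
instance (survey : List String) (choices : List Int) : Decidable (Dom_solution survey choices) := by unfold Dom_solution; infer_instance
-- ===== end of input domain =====

-- B drops A's pair-keyed dict and survey-major pass entirely: it interchanges the loops and
-- computes one independent signed sum per indicator pair (simpler; same cost, same return value on Pre_).

-- ===== PORT A =====
-- body of A's 'for s, c in zip(survey, choices)' loop (the inner 'for k in result.keys()' loop)
def stepA (res : PySem.Dict (Char × Char) Int) (sc : String × Int) : PySem.Dict (Char × Char) Int :=
  res.keys.foldl (fun r k =>
    match PySem.Str.pyGet? sc.1 0 with
    | none => r          -- s[0]: IndexError, excluded by Pre_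
    | some s0 =>
      if s0 = k.1 ∨ s0 = k.2 then                      -- s[0] in k (tuple membership)
        match PySem.Str.pyGet? sc.1 1 with
        | none => r      -- s[1]: IndexError, excluded by Pre_
        | some s1 =>
          let rev : Int := if s0 < s1 then 1 else -1   -- 1 if s[1] > s[0] else -1
          r.modify k 0 (fun v => v + sc.2 * rev)       -- result[k] += c * rev (key always present)
      else r) res

def solution (survey : List String) (choices : List Int) : String :=
  let choices2 := choices.map (fun x => x - 4)
  let result0 : PySem.Dict (Char × Char) Int :=
    ((((PySem.Dict.empty).insert ('R','T') 0).insert ('C','F') 0).insert ('J','M') 0).insert ('A','N') 0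
  let result := (List.zip survey choices2).foldl stepA result0
  PySem.Str.join "" (result.items.map (fun kv => if kv.2 ≤ 0 then String.ofList [kv.1.1] else String.ofList [kv.1.2]))

-- ===== PORT B =====
-- B's per-pair generator sum: 'sum((c-4) if s[1] > s[0] else (4-c) for s, c in zip(...) if s[0] in p)'
def pairSum (l : List (String × Int)) (a b : Char) : Int :=
  l.foldl (fun t sc =>
    match PySem.Str.pyGet? sc.1 0 with
    | none => t          -- s[0]: IndexError, excluded by Pre_
    | some s0 =>
      if s0 = a ∨ s0 = b then                          -- s[0] in p (p is the two-char string a++b)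
        match PySem.Str.pyGet? sc.1 1 with
        | none => t      -- s[1]: IndexError, excluded by Pre_
        | some s1 => t + (if s0 < s1 then sc.2 - 4 else 4 - sc.2)
      else t) 0

def solution_alt (survey : List String) (choices : List Int) : String :=
  ([('R','T'), ('C','F'), ('J','M'), ('A','N')]).foldl
    (fun ans p =>
      ans ++ (if pairSum (List.zip survey choices) p.1 p.2 ≤ 0
              then String.ofList [p.1] else String.ofList [p.2])) ""

-- ===== PRECONDITION & SPEC =====
-- Pre_ excludes exactly the inputs where A raises IndexError: some zipped survey string is
-- empty (s[0]) or starts with one of the eight type letters while having length 1 (s[1]).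
def Pre_solution (survey : List String) (choices : List Int) : Prop :=
  ∀ p ∈ List.zip survey choices, p.1.toList ≠ [] ∧
    (p.1.toList.headI ∈ (['R','T','C','F','J','M','A','N'] : List Char) → 2 ≤ p.1.toList.length)
instance (survey : List String) (choices : List Int) : Decidable (Pre_solution survey choices) := by
  unfold Pre_solution; infer_instance

def pvWitness_solution : List String × List Int := (["TR", "CF", "xy", "AN"], [7, 2, 4, 4])

def Spec_solution (survey : List String) (choices : List Int) (out : String) : Prop := out = solution_alt survey choices
instance (survey : List String) (choices : List Int) (out : String) : Decidable (Spec_solution survey choices out) := by unfold Spec_solution; infer_instance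

-- ===== CLAIM (what is proved, stated in full; the proofs are below) =====
def Claim_equal_solution : Prop := ∀ (survey : List String) (choices : List Int), Dom_solution survey choices → Pre_solution survey choices → Spec_solution survey choices (solution survey choices)

-- ===== LEMMAS AND PROOFS =====

-- Invariant shape of A's result dict: always exactly the four pairs as keys, in order.
def mkRes (a b c d : Int) : PySem.Dict (Char × Char) Int :=
  PySem.Dict.mk [(('R','T'), a), (('C','F'), b), (('J','M'), c), (('A','N'), d)]

-- one entry's signed contribution to the pair (a, b)
def contrib (s : String) (c : Int) (a b : Char) : Int :=
  match PySem.Str.pyGet? s 0 with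
  | none => 0
  | some s0 =>
    if s0 = a ∨ s0 = b then
      match PySem.Str.pyGet? s 1 with
      | none => 0
      | some s1 => if s0 < s1 then c - 4 else 4 - c
    else 0

-- B's fold is the shifted sum of contributions
lemma pairSum_eq_sum (l : List (String × Int)) (a b : Char) :
    pairSum l a b = (l.map (fun sc => contrib sc.1 sc.2 a b)).sum := by
  unfold pairSum
  rw [show (fun (t : Int) (sc : String × Int) =>
      match PySem.Str.pyGet? sc.1 0 with
      | none => t
      | some s0 =>
        if s0 = a ∨ s0 = b then
          match PySem.Str.pyGet? sc.1 1 with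
          | none => t
          | some s1 => t + (if s0 < s1 then sc.2 - 4 else 4 - sc.2)
        else t)
    = (fun t sc => t + contrib sc.1 sc.2 a b) from ?_, PySem.List.foldl_add, zero_add]
  · funext t sc
    unfold contrib
    cases PySem.Str.pyGet? sc.1 0 with
    | none => simp
    | some s0 =>
      by_cases hab : s0 = a ∨ s0 = b
      · simp only [hab, if_true]
        cases PySem.Str.pyGet? sc.1 1 <;> simp
      · simp [hab]

-- one iteration of A adds each entry's contribution to each of its four buckets
set_option maxHeartbeats 1600000 in
lemma stepA_mkRes (w x y z : Int) (s : String) (c : Int) :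
    stepA (mkRes w x y z) (s, c - 4)
      = mkRes (w + contrib s c 'R' 'T') (x + contrib s c 'C' 'F')
              (y + contrib s c 'J' 'M') (z + contrib s c 'A' 'N') := by
  unfold stepA contrib
  rcases h0 : PySem.Str.pyGet? s 0 with _ | s0
  · simp [mkRes, PySem.Dict.keys_mk]
  rcases h1 : PySem.Str.pyGet? s 1 with _ | s1 <;>
  · simp only [mkRes, PySem.Dict.keys_mk]
    split_ifs <;>
      simp_all [PySem.Dict.modify, PySem.Dict.insert, PySem.Dict.getD, PySem.Dict.get?,
        PySem.Dict.contains]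

-- the whole of A's loop, against the four per-pair sums
lemma foldA_eq (l : List (String × Int)) (w x y z : Int) :
    List.foldl stepA (mkRes w x y z) (l.map (Prod.map id (fun v => v - 4)))
      = mkRes (w + (l.map (fun sc => contrib sc.1 sc.2 'R' 'T')).sum)
              (x + (l.map (fun sc => contrib sc.1 sc.2 'C' 'F')).sum)
              (y + (l.map (fun sc => contrib sc.1 sc.2 'J' 'M')).sum)
              (z + (l.map (fun sc => contrib sc.1 sc.2 'A' 'N')).sum) := by
  induction l generalizing w x y z with
  | nil => simp [mkRes]
  | cons p t ih =>
    obtain ⟨s, c⟩ := p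
    simp only [List.map_cons, List.foldl_cons, Prod.map, id]
    rw [stepA_mkRes, ih]
    simp [mkRes, add_assoc]

-- ===== VERDICT (by name: the statement is the Claim_ definition above) =====
theorem solution_spec : Claim_equal_solution := by
  intro survey choices _hdom _hpre
  unfold Spec_solution solution solution_alt
  have h0 : ((((PySem.Dict.empty).insert ('R','T') (0:Int)).insert ('C','F') 0).insert ('J','M') 0).insert ('A','N') 0
      = mkRes 0 0 0 0 := by decide
  simp only [List.zip_map_right, h0]
  rw [show (Prod.map (@id String) fun x : Int => x - 4)
        = (Prod.map id (fun v : Int => v - 4)) from rfl]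
  rw [foldA_eq]
  simp only [zero_add, List.foldl_cons, List.foldl_nil, pairSum_eq_sum]
  simp only [mkRes, List.map_cons, List.map_nil]
  split_ifs <;> rfl
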